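-- pv_equiv track=rewrite | github.com/fredycampino/skiller | src/skiller/interfaces/tui/screen/prompt.py | text_offset_to_location
-- ===== SOURCE A (Python) =====
-- def text_offset_to_location(text: str, cursor_position: int) -> tuple[int, int]:
--     safe_position = max(0, min(len(text), cursor_position))
--     current_offset = 0
--     lines = text.split("\n")
--     for row, line in enumerate(lines):
--         line_end = current_offset + len(line)
--         if safe_position <= line_end:
--             return row, safe_position - current_offset
--         current_offset = line_end + 1
--     return len(lines) - 1, len(lines[-1])
-- ===== SOURCE B (Python) =====
-- def text_offset_to_location(text: str, cursor_position: int) -> tuple[int, int]: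
--     safe_position = max(0, min(len(text), cursor_position))
--     row = 0
--     col = 0
--     for ch in text[:safe_position]:
--         if ch == "\n":
--             row += 1
--             col = 0
--         else:
--             col += 1
--     return row, col
-- ===== Notes on version B (the rewrite author's own statement) =====
-- stated objective: simpler
-- what changed: B replaces the split-into-lines list plus offset-accumulating loop by a single character-level pass over the clamped prefix that counts newlines and resets a column counter.
import Mathlib
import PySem

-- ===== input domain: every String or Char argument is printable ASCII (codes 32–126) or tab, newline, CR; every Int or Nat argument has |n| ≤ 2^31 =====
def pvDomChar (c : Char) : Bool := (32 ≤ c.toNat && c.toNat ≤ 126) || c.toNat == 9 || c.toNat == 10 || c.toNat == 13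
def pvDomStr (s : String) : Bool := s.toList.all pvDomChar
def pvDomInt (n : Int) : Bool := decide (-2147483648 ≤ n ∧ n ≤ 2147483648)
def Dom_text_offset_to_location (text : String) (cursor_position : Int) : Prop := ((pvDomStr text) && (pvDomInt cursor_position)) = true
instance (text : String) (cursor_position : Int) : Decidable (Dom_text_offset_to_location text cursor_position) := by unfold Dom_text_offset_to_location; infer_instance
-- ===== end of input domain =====

-- B replaces A's split-into-lines loop by one character-level pass over the clamped
-- prefix (simpler); equivalence is proved for all inputs (both functions are total).

-- ===== PORT A =====
-- the for-row,line loop over the split lines: returns `some` on the in-loop return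
def pvLoopA : List (List Char) → Int → Int → Int → Option (Int × Int)
  | [], _, _, _ => none
  | line :: rest, row, off, safe =>
    if safe ≤ off + (line.length : Int) then some (row, safe - off)
    else pvLoopA rest (row + 1) (off + (line.length : Int) + 1) safe

def text_offset_to_location (text : String) (cursor_position : Int) : Int × Int :=
  let safe : Int := max 0 (min (PySem.Str.len text) cursor_position)
  let lines := PySem.Chars.splitOn text.toList ['\n']
  match pvLoopA lines 0 0 safe with
  | some rc => rc
  -- the fallthrough `return len(lines)-1, len(lines[-1])` (dead code in Python, proved dead here)
  | none => ((lines.length : Int) - 1, (((PySem.List.pyGet? lines (-1)).getD []).length : Int))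

-- ===== PORT B =====
def pvCharStep (rc : Int × Int) (ch : Char) : Int × Int :=
  if ch == '\n' then (rc.1 + 1, 0) else (rc.1, rc.2 + 1)

def text_offset_to_location_alt (text : String) (cursor_position : Int) : Int × Int :=
  let safe : Int := max 0 (min (PySem.Str.len text) cursor_position)
  (PySem.List.slice text.toList none (some safe)).foldl pvCharStep (0, 0)

-- ===== PRECONDITION & SPEC =====
def Spec_text_offset_to_location (text : String) (cursor_position : Int) (out : Int × Int) : Prop := out = text_offset_to_location_alt text cursor_position
instance (text : String) (cursor_position : Int) (out : Int × Int) : Decidable (Spec_text_offset_to_location text cursor_position out) := by unfold Spec_text_offset_to_location; infer_instance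

-- ===== CLAIM (what is proved, stated in full; the proofs are below) =====
def Claim_equal_text_offset_to_location : Prop := ∀ (text : String) (cursor_position : Int), Dom_text_offset_to_location text cursor_position → Spec_text_offset_to_location text cursor_position (text_offset_to_location text cursor_position)

-- ===== LEMMAS AND PROOFS =====

-- structural version of splitting on '\n'
def pvSplitNl : List Char → List (List Char)
  | [] => [[]]
  | c :: t =>
    if c = '\n' then [] :: pvSplitNl t
    else match pvSplitNl t with
      | [] => [[c]]
      | l :: ls => (c :: l) :: ls

def pvMapHead (f : List Char → List Char) : List (List Char) → List (List Char)
  | [] => []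
  | l :: ls => f l :: ls

def pvJoinNl : List (List Char) → List Char
  | [] => []
  | [l] => l
  | l :: ls => l ++ '\n' :: pvJoinNl ls

theorem pvSplitNl_ne_nil (cs : List Char) : pvSplitNl cs ≠ [] := by
  induction cs with
  | nil => simp [pvSplitNl]
  | cons c t ih =>
    simp only [pvSplitNl]
    split
    · simp
    · cases h : pvSplitNl t with
      | nil => simp
      | cons l ls => simp

theorem pvSplitOn_go_spec : ∀ (fuel : Nat) (l cur : List Char) (acc : List (List Char)),
    l.length ≤ fuel →
    PySem.Chars.splitOn.go ['\n'] fuel l cur acc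
      = acc.reverse ++ pvMapHead (fun x => cur.reverse ++ x) (pvSplitNl l) := by
  intro fuel
  induction fuel with
  | zero =>
    intro l cur acc h
    have : l = [] := List.length_eq_zero_iff.mp (Nat.le_zero.mp h)
    subst this
    simp [PySem.Chars.splitOn.go, pvSplitNl, pvMapHead]
  | succ n ih =>
    intro l cur acc h
    cases l with
    | nil => simp [PySem.Chars.splitOn.go, pvSplitNl, pvMapHead]
    | cons c t =>
      simp only [PySem.Chars.splitOn.go]
      by_cases hc : c = '\n'
      · subst hc
        rw [if_pos (by simp [List.isPrefixOf])]
        simp only [show (['\n'] : List Char).length = 1 from rfl, List.drop_succ_cons,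
          List.drop_zero]
        rw [ih t [] (cur.reverse :: acc) (by simpa using Nat.lt_succ_iff.mp (by simpa using h))]
        simp only [pvSplitNl, if_pos]
        cases hsp : pvSplitNl t with
        | nil => exact absurd hsp (pvSplitNl_ne_nil t)
        | cons l ls => simp [pvMapHead]
      · rw [if_neg (by simp [List.isPrefixOf]; exact fun h' => hc h'.symm)]
        rw [ih t (c :: cur) acc (by simpa using Nat.lt_succ_iff.mp (by simpa using h))]
        simp only [pvSplitNl, if_neg hc]
        cases hsp : pvSplitNl t with
        | nil => exact absurd hsp (pvSplitNl_ne_nil t)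
        | cons l ls => simp [pvMapHead]

theorem pvSplitOn_eq_splitNl (cs : List Char) :
    PySem.Chars.splitOn cs ['\n'] = pvSplitNl cs := by
  have := pvSplitOn_go_spec (cs.length + 1) cs [] [] (by omega)
  simp only [PySem.Chars.splitOn] at *
  rw [this]
  cases h : pvSplitNl cs with
  | nil => exact absurd h (pvSplitNl_ne_nil cs)
  | cons l ls => simp [pvMapHead]

theorem pvSplitNl_no_nl (cs : List Char) : ∀ l ∈ pvSplitNl cs, '\n' ∉ l := by
  induction cs with
  | nil => simp [pvSplitNl]
  | cons c t ih =>
    simp only [pvSplitNl]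
    by_cases hc : c = '\n'
    · subst hc; rw [if_pos rfl]
      intro l hl
      rcases List.mem_cons.mp hl with h | h
      · subst h; simp
      · exact ih l h
    · rw [if_neg hc]
      cases hsp : pvSplitNl t with
      | nil => exact absurd hsp (pvSplitNl_ne_nil t)
      | cons l0 ls =>
        intro l hl
        rcases List.mem_cons.mp hl with h | h
        · subst h
          intro hmem
          rcases List.mem_cons.mp hmem with h' | h'
          · exact hc h'.symm
          · exact ih l0 (by rw [hsp]; exact List.mem_cons_self) h'
        · exact ih l (by rw [hsp]; exact List.mem_cons_of_mem _ h)

theorem pvJoinNl_splitNl (cs : List Char) : pvJoinNl (pvSplitNl cs) = cs := by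
  induction cs with
  | nil => rfl
  | cons c t ih =>
    simp only [pvSplitNl]
    by_cases hc : c = '\n'
    · subst hc; rw [if_pos rfl]
      cases hsp : pvSplitNl t with
      | nil => exact absurd hsp (pvSplitNl_ne_nil t)
      | cons l ls =>
        rw [hsp] at ih
        simp [pvJoinNl, ih]
    · rw [if_neg hc]
      cases hsp : pvSplitNl t with
      | nil => exact absurd hsp (pvSplitNl_ne_nil t)
      | cons l ls =>
        rw [hsp] at ih
        cases ls with
        | nil => simp_all [pvJoinNl]
        | cons l' ls' => simp_all [pvJoinNl]

theorem pvFold_no_nl (l : List Char) (h : '\n' ∉ l) (r c : Int) :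
    l.foldl pvCharStep (r, c) = (r, c + l.length) := by
  induction l generalizing c with
  | nil => simp
  | cons x t ih =>
    have hx : x ≠ '\n' := fun hxe => h (hxe ▸ List.mem_cons_self)
    have ht : '\n' ∉ t := fun hm => h (List.mem_cons_of_mem _ hm)
    simp only [List.foldl_cons, pvCharStep, beq_iff_eq, if_neg hx]
    rw [ih ht (c + 1)]
    simp only [List.length_cons, Prod.mk.injEq, true_and]
    push_cast
    ring

theorem pvLoopA_cons (line : List Char) (rest : List (List Char)) (row off safe : Int) :
    pvLoopA (line :: rest) row off safe
      = if safe ≤ off + (line.length : Int) then some (row, safe - off)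
        else pvLoopA rest (row + 1) (off + (line.length : Int) + 1) safe := rfl

theorem pvMainLoop : ∀ (ls : List (List Char)), ls ≠ [] → (∀ l ∈ ls, '\n' ∉ l) →
    ∀ (k : Nat), k ≤ (pvJoinNl ls).length → ∀ (r off : Int),
    pvLoopA ls r off (off + k) = some (((pvJoinNl ls).take k).foldl pvCharStep (r, 0)) := by
  intro ls
  induction ls with
  | nil => intro h; exact absurd rfl h
  | cons l ls' ih =>
    intro _ hno k hk r off
    cases ls' with
    | nil =>
      simp only [pvJoinNl] at hk ⊢
      rw [pvLoopA_cons, if_pos (by omega)]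
      
      rw [pvFold_no_nl _ (fun hm => hno l List.mem_cons_self (List.mem_of_mem_take hm)) r 0]
      rw [Option.some_inj, Prod.ext_iff]
      refine ⟨rfl, ?_⟩
      simp only [List.length_take, Nat.min_eq_left hk]
      omega
    | cons l2 ls'' =>
      have hjoin : pvJoinNl (l :: l2 :: ls'') = l ++ '\n' :: pvJoinNl (l2 :: ls'') := rfl
      rw [hjoin] at hk ⊢
      rw [pvLoopA_cons]
      by_cases hkl : k ≤ l.length
      · rw [if_pos (by omega)]
        rw [List.take_append_of_le_length hkl]
        rw [pvFold_no_nl _ (fun hm => hno l List.mem_cons_self (List.mem_of_mem_take hm)) r 0]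
        rw [Option.some_inj, Prod.ext_iff]
        refine ⟨rfl, ?_⟩
        simp only [List.length_take, Nat.min_eq_left hkl]
        omega
      · rw [if_neg (by omega)]
        have hlen : (l ++ '\n' :: pvJoinNl (l2 :: ls'')).length
            = l.length + 1 + (pvJoinNl (l2 :: ls'')).length := by
          simp; omega
        set k' : Nat := k - l.length - 1 with hk'
        have hk'le : k' ≤ (pvJoinNl (l2 :: ls'')).length := by omega
        have hoff : off + (l.length : Int) + 1 + (k' : Nat)
            = off + (k : Nat) := by omega
        have := ih (by simp) (fun x hx => hno x (List.mem_cons_of_mem _ hx)) k' hk'le (r + 1)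
          (off + (l.length : Int) + 1)
        rw [hoff] at this
        rw [this]
        congr 1
        have htake : (l ++ '\n' :: pvJoinNl (l2 :: ls'')).take k
            = l ++ '\n' :: (pvJoinNl (l2 :: ls'')).take k' := by
          rw [List.take_append, List.take_of_length_le (by omega)]
          congr 1
          have : k - l.length = k' + 1 := by omega
          rw [this]
          simp
        rw [htake, List.foldl_append]
        rw [pvFold_no_nl _ (hno l List.mem_cons_self) r 0]
        simp [pvCharStep]

-- ===== VERDICT (by name: the statement is the Claim_ definition above) =====
theorem text_offset_to_location_spec : Claim_equal_text_offset_to_location := by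
  intro text cursor_position _
  unfold Spec_text_offset_to_location text_offset_to_location text_offset_to_location_alt
  simp only [PySem.Str.len]
  set cs := text.toList with hcs
  set safe : Int := max 0 (min (cs.length : Int) cursor_position) with hsafe
  have h0 : 0 ≤ safe := le_max_left _ _
  have hle : safe ≤ (cs.length : Int) := by
    rw [hsafe]; simp
  have hksafe : safe = (safe.toNat : Int) := (Int.toNat_of_nonneg h0).symm
  have hk : safe.toNat ≤ cs.length := by omega
  rw [PySem.List.slice_to _ h0]
  rw [pvSplitOn_eq_splitNl]
  have hmain := pvMainLoop (pvSplitNl cs) (pvSplitNl_ne_nil cs) (pvSplitNl_no_nl cs)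
    safe.toNat (by rw [pvJoinNl_splitNl]; exact hk) 0 0
  rw [pvJoinNl_splitNl] at hmain
  have hz : (0 : Int) + (safe.toNat : Nat) = safe := by omega
  rw [hz] at hmain
  rw [hmain]
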